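-- pv_equiv track=rewrite | github.com/holovata/lingv-lab1-NER-2024 | adresses.py | group_addresses
-- ===== SOURCE A (Python) =====
-- from collections import defaultdict
--
-- def generate_keys(component_dict):
--     keys = set()
--     street_name = component_dict.get('street_name', '').lower()
--     city = component_dict.get('city', '').lower()
--     state = component_dict.get('state', '').lower()
--     zip_code = component_dict.get('zip', '')
--
--     # Якщо є ZIP-код, використовуємо його в ключі
--     if zip_code:
--         keys.add(f"{zip_code}")
--
--     # Створюємо комбінації компонентів, що включають назву вулиці та місто
--     if street_name and city:
--         keys.add(f"{street_name}|{city}")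
--     elif street_name:
--         keys.add(street_name)
--     else:
--         # Якщо назви вулиці немає, використовуємо комбінацію міста та штату
--         if city and state:
--             keys.add(f"{city}|{state}")
--
--     return keys
--
-- def group_addresses(entities):
--     key_to_addresses = defaultdict(set)
--     address_to_keys = {}
--
--     for address, components in entities:
--         keys = generate_keys(components)
--         address_to_keys[address] = keys
--         for key in keys:
--             key_to_addresses[key].add(address)
--
--     # Об'єднуємо групи на основі перетину ключів
--     groups = []
--     visited = set()
--
--     for address in address_to_keys:
--         if address in visited:
--             continue
--         stack = [address]
--         group = set()
--         while stack:
--             current_address = stack.pop()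
--             if current_address in visited:
--                 continue
--             visited.add(current_address)
--             group.add(current_address)
--             current_keys = address_to_keys[current_address]
--             for key in current_keys:
--                 neighbors = key_to_addresses[key]
--                 for neighbor in neighbors:
--                     if neighbor not in visited:
--                         stack.append(neighbor)
--         groups.append(group)
--     return groups
-- ===== SOURCE B (Python) =====
-- def generate_keys(component_dict):
--     keys = set()
--     street_name = component_dict.get('street_name', '').lower()
--     city = component_dict.get('city', '').lower()
--     state = component_dict.get('state', '').lower()
--     zip_code = component_dict.get('zip', '')
--     if zip_code:
--         keys.add(f"{zip_code}")
--     if street_name and city: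
--         keys.add(f"{street_name}|{city}")
--     elif street_name:
--         keys.add(street_name)
--     else:
--         if city and state:
--             keys.add(f"{city}|{state}")
--     return keys
--
-- def group_addresses(entities):
--     # Naive fixpoint grouping: one key set per address, then saturate each
--     # address's component directly against all addresses; deduplicate components.
--     key_map = {}
--     for address, components in entities:
--         key_map[address] = generate_keys(components)
--     addresses = list(key_map)
--     groups = []
--     for a in addresses:
--         comp = {a}
--         comp_keys = set(key_map[a])
--         changed = True
--         while changed:
--             changed = False
--             for b in addresses:
--                 if b not in comp and not comp_keys.isdisjoint(key_map[b]):
--                     comp.add(b)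
--                     comp_keys |= key_map[b]
--                     changed = True
--         if comp not in groups:
--             groups.append(comp)
--     return groups
-- ===== Notes on version B (the rewrite author's own statement) =====
-- stated objective: simpler
-- what changed: Drops A's key-to-addresses index and explicit-stack DFS; B keeps one key set per address and saturates each address's component directly by re-sweeping the address list for key overlaps, deduplicating equal components on append.
import Mathlib
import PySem

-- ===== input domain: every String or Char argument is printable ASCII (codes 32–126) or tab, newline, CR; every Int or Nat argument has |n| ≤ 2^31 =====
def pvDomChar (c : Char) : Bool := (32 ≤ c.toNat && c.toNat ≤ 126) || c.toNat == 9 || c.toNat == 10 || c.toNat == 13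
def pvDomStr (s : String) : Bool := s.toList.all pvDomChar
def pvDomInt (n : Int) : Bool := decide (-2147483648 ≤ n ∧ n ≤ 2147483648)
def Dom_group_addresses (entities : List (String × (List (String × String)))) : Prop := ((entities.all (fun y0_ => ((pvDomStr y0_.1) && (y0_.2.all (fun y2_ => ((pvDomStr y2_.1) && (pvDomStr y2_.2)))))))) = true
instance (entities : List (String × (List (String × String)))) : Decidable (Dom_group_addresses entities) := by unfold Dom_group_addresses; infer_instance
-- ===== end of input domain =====

-- B replaces A's key→addresses index and explicit-stack DFS by a direct per-address fixpoint
-- saturation with component deduplication (objective: simpler, not faster).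
-- Python returns a list of SETS; a Python set is unordered, so both ports represent each
-- returned set canonically as the sublist of the address list (first-occurrence order) that
-- belongs to it — exact as a set, which is all a Python set value carries.

-- ===== PORT A =====
-- shared helper: both Source A and Source B contain the identical module-level generate_keys
-- f"{x}|{y}" ported as "|".join([x, y]) (PySem.Str.join), the same string
def generateKeys (component_dict : List (String × String)) : PySem.Set String :=
  let street_name := PySem.Str.lower (PySem.Dict.getD (PySem.Dict.mk component_dict) "street_name" "")
  let city := PySem.Str.lower (PySem.Dict.getD (PySem.Dict.mk component_dict) "city" "")
  let state := PySem.Str.lower (PySem.Dict.getD (PySem.Dict.mk component_dict) "state" "")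
  let zip_code := PySem.Dict.getD (PySem.Dict.mk component_dict) "zip" ""
  let keys : PySem.Set String := PySem.Set.empty
  let keys := if zip_code ≠ "" then PySem.Set.add keys zip_code else keys
  if street_name ≠ "" ∧ city ≠ "" then PySem.Set.add keys (PySem.Str.join "|" [street_name, city])
  else if street_name ≠ "" then PySem.Set.add keys street_name
  else if city ≠ "" ∧ state ≠ "" then PySem.Set.add keys (PySem.Str.join "|" [city, state])
  else keys

-- the while-stack loop; fuel is only a totality guard (proved sufficient below, the Python
-- loop terminates for the same reason); Python pops from the END of the list
def dfsA (kta atk : PySem.Dict String (PySem.Set String)) :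
    Nat → List String → PySem.Set String → PySem.Set String → PySem.Set String × PySem.Set String
  | 0, _, visited, group => (visited, group)
  | fuel+1, stack, visited, group =>
    match stack.getLast? with
    | none => (visited, group)
    | some current =>
      let rest := stack.dropLast
      if PySem.Set.contains visited current then
        dfsA kta atk fuel rest visited group
      else
        let visited' := PySem.Set.add visited current
        let group' := PySem.Set.add group current
        -- address_to_keys[current]: current is always a stored address (getD default never read)
        let currentKeys := PySem.Dict.getD atk current PySem.Set.empty
        -- key_to_addresses[key] on the defaultdict: reading a missing key inserts set(), which
        -- adds no neighbour and is never read again — getD with the empty set is exact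
        let stack' := currentKeys.foldl (fun s key =>
          (PySem.Dict.getD kta key PySem.Set.empty).foldl (fun s neighbor =>
            if PySem.Set.contains visited' neighbor then s else s ++ [neighbor]) s) rest
        dfsA kta atk fuel stack' visited' group'

def group_addresses (entities : List (String × (List (String × String)))) : List (List String) :=
  let st := entities.foldl
    (fun (st : PySem.Dict String (PySem.Set String) × PySem.Dict String (PySem.Set String)) e =>
      let keys := generateKeys e.2
      let atk := st.2.insert e.1 keys
      let kta := keys.foldl (fun kta key =>
        kta.modify key PySem.Set.empty (fun s => PySem.Set.add s e.1)) st.1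
      (kta, atk))
    (PySem.Dict.empty, PySem.Dict.empty)
  let kta := st.1
  let atk := st.2
  let fuel := 1 + ((PySem.Dict.keys atk).map (fun u =>
    1 + ((PySem.Dict.getD atk u PySem.Set.empty).map (fun k => (PySem.Dict.getD kta k PySem.Set.empty).length)).sum)).sum
  let res := (PySem.Dict.keys atk).foldl
    (fun (acc : PySem.Set String × List (List String)) address =>
      if PySem.Set.contains acc.1 address then acc
      else
        let r := dfsA kta atk fuel [address] acc.1 PySem.Set.empty
        (r.1, acc.2 ++ [(PySem.Dict.keys atk).filter (fun z => PySem.Set.contains r.2 z)]))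
    (PySem.Set.empty, [])
  res.2

-- ===== PORT B =====
-- one 'for b in addresses' sweep of the while-loop body
def sweepB (km : PySem.Dict String (PySem.Set String)) (addresses : List String)
    (comp compKeys : PySem.Set String) : PySem.Set String × PySem.Set String × Bool :=
  addresses.foldl (fun acc b =>
    -- key_map[b]: b is a key of key_map (getD default never read)
    if ¬ acc.1.contains b ∧ PySem.Set.isdisjoint acc.2.1 (PySem.Dict.getD km b PySem.Set.empty) = false then
      (PySem.Set.add acc.1 b, PySem.Set.union acc.2.1 (PySem.Dict.getD km b PySem.Set.empty), true)
    else acc)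
    (comp, compKeys, false)

-- 'changed = True; while changed: changed = False; <sweep>'; fuel is a totality guard
-- (each repeated sweep grows comp, proved sufficient below)
def saturateB (km : PySem.Dict String (PySem.Set String)) (addresses : List String) :
    Nat → PySem.Set String → PySem.Set String → PySem.Set String × PySem.Set String
  | 0, comp, compKeys => (comp, compKeys)
  | fuel+1, comp, compKeys =>
    let r := sweepB km addresses comp compKeys
    if r.2.2 then saturateB km addresses fuel r.1 r.2.1 else (r.1, r.2.1)

def group_addresses_alt (entities : List (String × (List (String × String)))) : List (List String) :=
  let km := entities.foldl
    (fun (km : PySem.Dict String (PySem.Set String)) e => km.insert e.1 (generateKeys e.2))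
    PySem.Dict.empty
  let addresses := PySem.Dict.keys km
  addresses.foldl (fun (groups : List (List String)) a =>
    let r := saturateB km addresses (addresses.length + 1)
      (PySem.Set.add PySem.Set.empty a)
      (PySem.Set.ofList (PySem.Dict.getD km a PySem.Set.empty))
    let c := addresses.filter (fun z => PySem.Set.contains r.1 z)
    -- 'if comp not in groups' compares sets; on the canonical sublist representation
    -- set equality is list equality
    if groups.contains c then groups else groups ++ [c])
    []

-- ===== PRECONDITION & SPEC =====
-- Pre_ excludes lists in which the same address string occurs with component dicts that
-- generate two different key sets: there A's key index keeps stale registrations of the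
-- overwritten occurrence's keys (linking through keys the address no longer has), a
-- dict-overwrite accident no caller would specify; B uses one key set per address.
def Pre_group_addresses (entities : List (String × (List (String × String)))) : Prop :=
  entities.Pairwise (fun x y => x.1 = y.1 → generateKeys x.2 = generateKeys y.2)
instance (entities : List (String × (List (String × String)))) : Decidable (Pre_group_addresses entities) := by unfold Pre_group_addresses; infer_instance

def pvWitness_group_addresses : (List (String × (List (String × String)))) :=
  [("12 Main St", [("street_name", "Main"), ("city", "Springfield"), ("zip", "11")]),
   ("34 Oak Ave", [("zip", "11")]),
   ("56 Elm Rd", [("city", "Shelby"), ("state", "IL")])]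

def Spec_group_addresses (entities : List (String × (List (String × String)))) (out : List (List String)) : Prop := out = group_addresses_alt entities
instance (entities : List (String × (List (String × String)))) (out : List (List String)) : Decidable (Spec_group_addresses entities out) := by unfold Spec_group_addresses; infer_instance

-- ===== CLAIM (what is proved, stated in full; the proofs are below) =====
def Claim_equal_group_addresses : Prop := ∀ (entities : List (String × (List (String × String)))), Dom_group_addresses entities → Pre_group_addresses entities → Spec_group_addresses entities (group_addresses entities)


-- ===== LEMMAS AND PROOFS =====

-- ---- proof-side abbreviations ----

def pvKeyOf (km : PySem.Dict String (PySem.Set String)) (a : String) : PySem.Set String :=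
  PySem.Dict.getD km a PySem.Set.empty

-- two addresses share a key
def pvAdj (km : PySem.Dict String (PySem.Set String)) (x y : String) : Prop :=
  ∃ k, k ∈ pvKeyOf km x ∧ k ∈ pvKeyOf km y

-- the address → key-set dict both programs build
def pvKM (entities : List (String × (List (String × String)))) : PySem.Dict String (PySem.Set String) :=
  entities.foldl (fun km e => km.insert e.1 (generateKeys e.2)) PySem.Dict.empty

-- A's combined fold state
def pvStepA (st : PySem.Dict String (PySem.Set String) × PySem.Dict String (PySem.Set String))
    (e : String × List (String × String)) :
    PySem.Dict String (PySem.Set String) × PySem.Dict String (PySem.Set String) :=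
  let keys := generateKeys e.2
  let atk := st.2.insert e.1 keys
  let kta := keys.foldl (fun kta key =>
    kta.modify key PySem.Set.empty (fun s => PySem.Set.add s e.1)) st.1
  (kta, atk)

def pvKTA (entities : List (String × (List (String × String)))) : PySem.Dict String (PySem.Set String) :=
  (entities.foldl pvStepA (PySem.Dict.empty, PySem.Dict.empty)).1

-- A's neighbour relation as the dfs reads it
def pvNbr (kta atk : PySem.Dict String (PySem.Set String)) (x y : String) : Prop :=
  ∃ k, k ∈ PySem.Dict.getD atk x PySem.Set.empty ∧ y ∈ PySem.Dict.getD kta k PySem.Set.empty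

-- reachable from the stack through unvisited vertices
inductive pvReach (nbr : String → String → Prop) (visited stack : List String) : String → Prop
  | base (x : String) : x ∈ stack → x ∉ visited → pvReach nbr visited stack x
  | step (x y : String) : pvReach nbr visited stack x → nbr x y → y ∉ visited → pvReach nbr visited stack y

-- B's component of a seed address
def pvComp (km : PySem.Dict String (PySem.Set String)) (a : String) : PySem.Set String :=
  (saturateB km (PySem.Dict.keys km) ((PySem.Dict.keys km).length + 1)
    (PySem.Set.add PySem.Set.empty a) (PySem.Set.ofList (pvKeyOf km a))).1

def pvDeg (kta atk : PySem.Dict String (PySem.Set String)) (u : String) : Nat :=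
  ((PySem.Dict.getD atk u PySem.Set.empty).map (fun k => (PySem.Dict.getD kta k PySem.Set.empty).length)).sum

-- the sweep-state invariant: compKeys is exactly the union of the members' key sets
def pvInv (km : PySem.Dict String (PySem.Set String)) (comp compKeys : PySem.Set String) : Prop :=
  ∀ k, k ∈ compKeys ↔ ∃ x ∈ comp, k ∈ pvKeyOf km x

-- ---- B side: one sweep ----

theorem sweep_master (km : PySem.Dict String (PySem.Set String)) (P : String → Prop)
    (hstep : ∀ x y, P x → x ∈ PySem.Dict.keys km → y ∈ PySem.Dict.keys km → pvAdj km x y → P y) :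
    ∀ (l : List String) (acc : PySem.Set String × PySem.Set String × Bool),
    l ⊆ PySem.Dict.keys km →
    acc.1.Nodup → (∀ x ∈ acc.1, P x) → acc.1 ⊆ PySem.Dict.keys km → pvInv km acc.1 acc.2.1 →
    (let r := l.foldl (fun acc b =>
        if ¬ acc.1.contains b ∧ PySem.Set.isdisjoint acc.2.1 (PySem.Dict.getD km b PySem.Set.empty) = false then
          (PySem.Set.add acc.1 b, PySem.Set.union acc.2.1 (PySem.Dict.getD km b PySem.Set.empty), true)
        else acc) acc
     (∀ x ∈ acc.1, x ∈ r.1) ∧ r.1.Nodup ∧ (∀ x ∈ r.1, P x) ∧ r.1 ⊆ PySem.Dict.keys km ∧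
     pvInv km r.1 r.2.1 ∧
     (acc.2.2 = true → r.2.2 = true) ∧
     (r.2.2 = false → r = acc ∧ (∀ b ∈ l, b ∉ acc.1 → PySem.Set.isdisjoint acc.2.1 (pvKeyOf km b) = true)) ∧
     acc.1.length ≤ r.1.length ∧
     (acc.2.2 = false → r.2.2 = true → acc.1.length < r.1.length)) := by
  intro l
  induction l with
  | nil =>
    intro acc _ hnd hp hsub hinv
    refine ⟨fun x hx => hx, hnd, hp, hsub, hinv, fun h => h, ?_, le_refl _, ?_⟩
    · intro _
      exact ⟨List.foldl_nil, by intro b hb; simp at hb⟩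
    · intro h1 h2
      rw [List.foldl_nil, h1] at h2
      cases h2
  | cons b l ih =>
    intro acc hl hnd hp hsub hinv
    simp only [List.foldl_cons]
    have hbk : b ∈ PySem.Dict.keys km := hl List.mem_cons_self
    have hl' : l ⊆ PySem.Dict.keys km := fun x hx => hl (List.mem_cons_of_mem _ hx)
    by_cases hcond : ¬ acc.1.contains b ∧ PySem.Set.isdisjoint acc.2.1 (PySem.Dict.getD km b PySem.Set.empty) = false
    · rw [if_pos hcond]
      have hbP : P b := by
        rcases hcond with ⟨_, hdis⟩
        have hnall : ¬ (∀ x ∈ acc.2.1, x ∉ PySem.Dict.getD km b PySem.Set.empty) := by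
          intro hall
          rw [(PySem.Set.isdisjoint_iff _ _).2 hall] at hdis
          cases hdis
        push_neg at hnall
        rcases hnall with ⟨k, hk1, hk2⟩
        rcases (hinv k).1 hk1 with ⟨x, hx, hkx⟩
        exact hstep x b (hp x hx) (hsub hx) hbk ⟨k, hkx, hk2⟩
      have hnb : b ∉ acc.1 := by
        rcases hcond with ⟨hnc, _⟩
        intro hmem
        exact hnc ((PySem.Set.contains_iff _ _).2 hmem)
      have hinv' : pvInv km (PySem.Set.add acc.1 b) (PySem.Set.union acc.2.1 (PySem.Dict.getD km b PySem.Set.empty)) := by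
        intro k
        rw [PySem.Set.mem_union]
        constructor
        · rintro (h | h)
          · rcases (hinv k).1 h with ⟨x, hx, hkx⟩
            exact ⟨x, (PySem.Set.mem_add _ _ _).2 (Or.inl hx), hkx⟩
          · exact ⟨b, (PySem.Set.mem_add _ _ _).2 (Or.inr rfl), h⟩
        · rintro ⟨x, hx, hkx⟩
          rcases (PySem.Set.mem_add _ _ _).1 hx with h | h
          · exact Or.inl ((hinv k).2 ⟨x, h, hkx⟩)
          · subst h; exact Or.inr hkx
      have hrec := ih (PySem.Set.add acc.1 b, PySem.Set.union acc.2.1 (PySem.Dict.getD km b PySem.Set.empty), true) hl'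
        (PySem.Set.nodup_add _ _ hnd)
        (by
          intro x hx
          rcases (PySem.Set.mem_add _ _ _).1 hx with h | h
          · exact hp x h
          · subst h; exact hbP)
        (by
          intro x hx
          rcases (PySem.Set.mem_add _ _ _).1 hx with h | h
          · exact hsub h
          · subst h; exact hbk)
        hinv'
      obtain ⟨c1, c2, c3, c4, c5, c6, c7, c8, c9⟩ := hrec
      dsimp only at c1 c2 c3 c4 c5 c6 c7 c8 c9
      have hlen : (PySem.Set.add acc.1 b).length = acc.1.length + 1 := by
        rw [PySem.Set.add_of_not_mem hnb]
        simp
      refine ⟨?_, c2, c3, c4, c5, ?_, ?_, by omega, by intro _ _; omega⟩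
      · intro x hx
        exact c1 x ((PySem.Set.mem_add _ _ _).2 (Or.inl hx))
      · intro _
        exact c6 rfl
      · intro hfalse
        exact Bool.noConfusion ((c6 rfl).symm.trans hfalse)
    · rw [if_neg hcond]
      have hrec := ih acc hl' hnd hp hsub hinv
      obtain ⟨c1, c2, c3, c4, c5, c6, c7, c8, c9⟩ := hrec
      refine ⟨c1, c2, c3, c4, c5, c6, ?_, c8, c9⟩
      intro hfalse
      rcases c7 hfalse with ⟨heq, hdisj⟩
      refine ⟨heq, ?_⟩
      intro b' hb' hnb'
      rcases List.mem_cons.1 hb' with h | h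
      · subst h
        by_cases hdd : PySem.Set.isdisjoint acc.2.1 (pvKeyOf km b') = true
        · exact hdd
        · exfalso
          apply hcond
          constructor
          · intro hcont
            exact hnb' ((PySem.Set.contains_iff _ _).1 hcont)
          · cases hx : PySem.Set.isdisjoint acc.2.1 (PySem.Dict.getD km b' PySem.Set.empty)
            · rfl
            · exact absurd hx hdd
      · exact hdisj b' h hnb'

theorem saturate_master (km : PySem.Dict String (PySem.Set String)) (P : String → Prop)
    (hstep : ∀ x y, P x → x ∈ PySem.Dict.keys km → y ∈ PySem.Dict.keys km → pvAdj km x y → P y) :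
    ∀ (fuel : Nat) (comp compKeys : PySem.Set String),
    comp.Nodup → (∀ x ∈ comp, P x) → comp ⊆ PySem.Dict.keys km → pvInv km comp compKeys →
    (PySem.Dict.keys km).length + 1 ≤ fuel + comp.length →
    (let r := saturateB km (PySem.Dict.keys km) fuel comp compKeys
     (∀ x ∈ comp, x ∈ r.1) ∧ r.1.Nodup ∧ (∀ x ∈ r.1, P x) ∧ r.1 ⊆ PySem.Dict.keys km ∧
     (∀ x b, x ∈ r.1 → b ∈ PySem.Dict.keys km → pvAdj km x b → b ∈ r.1)) := by
  intro fuel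
  induction fuel with
  | zero =>
    intro comp compKeys hnd hp hsub hinv hfuel
    exfalso
    have := (hnd.subperm hsub).length_le
    omega
  | succ fuel ih =>
    intro comp compKeys hnd hp hsub hinv hfuel
    have hsw := sweep_master km P hstep (PySem.Dict.keys km) (comp, compKeys, false)
      (fun x hx => hx) hnd hp hsub hinv
    obtain ⟨c1, c2, c3, c4, c5, c6, c7, c8, c9⟩ := hsw
    have hE : sweepB km (PySem.Dict.keys km) comp compKeys =
        (PySem.Dict.keys km).foldl (fun acc b =>
          if ¬ acc.1.contains b ∧ PySem.Set.isdisjoint acc.2.1 (PySem.Dict.getD km b PySem.Set.empty) = false then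
            (PySem.Set.add acc.1 b, PySem.Set.union acc.2.1 (PySem.Dict.getD km b PySem.Set.empty), true)
          else acc) (comp, compKeys, false) := rfl
    by_cases hch : (sweepB km (PySem.Dict.keys km) comp compKeys).2.2 = true
    · have hlt : comp.length < (sweepB km (PySem.Dict.keys km) comp compKeys).1.length := by
        apply c9 rfl
        rw [← hE]
        exact hch
      have hrec := ih (sweepB km (PySem.Dict.keys km) comp compKeys).1
        (sweepB km (PySem.Dict.keys km) comp compKeys).2.1
        (by rw [hE]; exact c2) (by rw [hE]; exact c3) (by rw [hE]; exact c4) (by rw [hE]; exact c5)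
        (by omega)
      obtain ⟨d1, d2, d3, d4, d5⟩ := hrec
      have hred : saturateB km (PySem.Dict.keys km) (fuel + 1) comp compKeys =
          saturateB km (PySem.Dict.keys km) fuel (sweepB km (PySem.Dict.keys km) comp compKeys).1
            (sweepB km (PySem.Dict.keys km) comp compKeys).2.1 := by
        rw [saturateB]
        simp only [hch, if_true]
      rw [hred]
      refine ⟨?_, d2, d3, d4, d5⟩
      intro x hx
      apply d1
      rw [hE]
      exact c1 x hx
    · have hch' : (sweepB km (PySem.Dict.keys km) comp compKeys).2.2 = false := by
        cases h : (sweepB km (PySem.Dict.keys km) comp compKeys).2.2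
        · rfl
        · exact absurd h hch
      have hc7 := c7 (by rw [← hE]; exact hch')
      have hred : saturateB km (PySem.Dict.keys km) (fuel + 1) comp compKeys =
          ((sweepB km (PySem.Dict.keys km) comp compKeys).1,
           (sweepB km (PySem.Dict.keys km) comp compKeys).2.1) := by
        rw [saturateB]
        simp only [hch', Bool.false_eq_true, if_false]
      have hacc : sweepB km (PySem.Dict.keys km) comp compKeys = (comp, compKeys, false) := by
        rw [hE]; exact hc7.1
      rw [hred, hacc]
      refine ⟨fun x hx => hx, hnd, hp, hsub, ?_⟩
      intro x b hx hb hadj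
      by_cases hbc : b ∈ comp
      · exact hbc
      · exfalso
        have hdis := hc7.2 b hb hbc
        rcases hadj with ⟨k, hkx, hkb⟩
        have hkck : k ∈ compKeys := (hinv k).2 ⟨x, hx, hkx⟩
        exact ((PySem.Set.isdisjoint_iff _ _).1 hdis) k hkck hkb

theorem comp_master (km : PySem.Dict String (PySem.Set String)) (P : String → Prop) (a : String)
    (hstep : ∀ x y, P x → x ∈ PySem.Dict.keys km → y ∈ PySem.Dict.keys km → pvAdj km x y → P y)
    (hPa : P a) (ha : a ∈ PySem.Dict.keys km) :
    a ∈ pvComp km a ∧ (pvComp km a).Nodup ∧ (∀ x ∈ pvComp km a, P x) ∧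
    pvComp km a ⊆ PySem.Dict.keys km ∧
    (∀ x b, x ∈ pvComp km a → b ∈ PySem.Dict.keys km → pvAdj km x b → b ∈ pvComp km a) := by
  have hadd : PySem.Set.add PySem.Set.empty a = [a] := rfl
  have hsm := saturate_master km P hstep ((PySem.Dict.keys km).length + 1)
    (PySem.Set.add PySem.Set.empty a) (PySem.Set.ofList (pvKeyOf km a))
    (by rw [hadd]; simp)
    (by
      intro x hx
      rw [hadd] at hx
      simp at hx
      subst hx
      exact hPa)
    (by
      intro x hx
      rw [hadd] at hx
      simp at hx
      subst hx
      exact ha)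
    (by
      intro k
      rw [PySem.Set.mem_ofList, hadd]
      constructor
      · intro hk
        exact ⟨a, by simp, hk⟩
      · rintro ⟨x, hx, hkx⟩
        simp at hx
        subst hx
        exact hkx)
    (by rw [hadd]; simp)
  obtain ⟨d1, d2, d3, d4, d5⟩ := hsm
  refine ⟨?_, d2, d3, d4, d5⟩
  apply d1
  rw [hadd]
  simp

theorem comp_self (km : PySem.Dict String (PySem.Set String)) (a : String) (ha : a ∈ PySem.Dict.keys km) :
    a ∈ pvComp km a :=
  (comp_master km (fun _ => True) a (fun _ _ _ _ _ _ => trivial) trivial ha).1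

theorem comp_subset (km : PySem.Dict String (PySem.Set String)) (a : String) (ha : a ∈ PySem.Dict.keys km) :
    pvComp km a ⊆ PySem.Dict.keys km :=
  (comp_master km (fun _ => True) a (fun _ _ _ _ _ _ => trivial) trivial ha).2.2.2.1

theorem comp_closed (km : PySem.Dict String (PySem.Set String)) (a : String) (ha : a ∈ PySem.Dict.keys km) :
    ∀ x b, x ∈ pvComp km a → b ∈ PySem.Dict.keys km → pvAdj km x b → b ∈ pvComp km a :=
  (comp_master km (fun _ => True) a (fun _ _ _ _ _ _ => trivial) trivial ha).2.2.2.2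

theorem comp_min (km : PySem.Dict String (PySem.Set String)) (P : String → Prop) (a : String)
    (hstep : ∀ x y, P x → x ∈ PySem.Dict.keys km → y ∈ PySem.Dict.keys km → pvAdj km x y → P y)
    (hPa : P a) (ha : a ∈ PySem.Dict.keys km) : ∀ x ∈ pvComp km a, P x :=
  (comp_master km P a hstep hPa ha).2.2.1

theorem adj_symm (km : PySem.Dict String (PySem.Set String)) {x y : String} (h : pvAdj km x y) : pvAdj km y x := by
  obtain ⟨k, h1, h2⟩ := h; exact ⟨k, h2, h1⟩

theorem comp_subset_of_mem (km : PySem.Dict String (PySem.Set String)) {a b : String}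
    (ha : a ∈ PySem.Dict.keys km) (hb : b ∈ PySem.Dict.keys km) (h : b ∈ pvComp km a) :
    ∀ z ∈ pvComp km b, z ∈ pvComp km a := by
  intro z hz
  exact comp_min km (fun w => w ∈ pvComp km a) b
    (fun x y hx _ hyk hadj => comp_closed km a ha x y hx hyk hadj) h hb z hz

theorem comp_mem_symm (km : PySem.Dict String (PySem.Set String)) {a b : String}
    (ha : a ∈ PySem.Dict.keys km) (h : b ∈ pvComp km a) : a ∈ pvComp km b := by
  have hb : b ∈ PySem.Dict.keys km := comp_subset km a ha h
  refine comp_min km (fun z => a ∈ pvComp km z) a ?_ (comp_self km a ha) ha b h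
  intro x y hx hxk hyk hadj
  have hxy : x ∈ pvComp km y :=
    comp_closed km y hyk y x (comp_self km y hyk) hxk (adj_symm km hadj)
  exact comp_subset_of_mem km hyk hxk hxy a hx

theorem comp_eq_of_mem (km : PySem.Dict String (PySem.Set String)) {a b : String}
    (ha : a ∈ PySem.Dict.keys km) (hb : b ∈ PySem.Dict.keys km) (h : b ∈ pvComp km a) :
    ∀ z, z ∈ pvComp km a ↔ z ∈ pvComp km b := by
  intro z
  constructor
  · intro hz
    have hab : a ∈ pvComp km b := comp_mem_symm km ha h
    exact comp_subset_of_mem km hb ha hab z hz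
  · intro hz
    exact comp_subset_of_mem km ha hb h z hz

-- ---- dict characterizations ----

theorem fold_pair_snd : ∀ (l : List (String × (List (String × String))))
    (d1 d2 : PySem.Dict String (PySem.Set String)),
    (l.foldl pvStepA (d1, d2)).2 = l.foldl (fun d e => d.insert e.1 (generateKeys e.2)) d2 := by
  intro l
  induction l with
  | nil => intro d1 d2; rfl
  | cons e l ih =>
    intro d1 d2
    simp only [List.foldl_cons]
    exact ih _ _

theorem get?_fold_insert_of_ne : ∀ (l : List (String × (List (String × String))))
    (d0 : PySem.Dict String (PySem.Set String)) (a : String), (∀ e ∈ l, e.1 ≠ a) →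
    (l.foldl (fun d e => d.insert e.1 (generateKeys e.2)) d0).get? a = d0.get? a := by
  intro l
  induction l with
  | nil => intro d0 a _; rfl
  | cons e l ih =>
    intro d0 a h
    simp only [List.foldl_cons]
    rw [ih _ _ (fun e' he' => h e' (List.mem_cons_of_mem _ he'))]
    rw [PySem.Dict.get?_insert]
    simp [Ne.symm (h e List.mem_cons_self)]

theorem get?_fold_insert_eq : ∀ (l : List (String × (List (String × String))))
    (d0 : PySem.Dict String (PySem.Set String)) (a : String) (v : PySem.Set String),
    (∀ e ∈ l, e.1 = a → generateKeys e.2 = v) → (∃ e ∈ l, e.1 = a) →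
    (l.foldl (fun d e => d.insert e.1 (generateKeys e.2)) d0).get? a = some v := by
  intro l
  induction l with
  | nil =>
    rintro d0 a v h ⟨e, he, _⟩
    simp at he
  | cons e l ih =>
    intro d0 a v h hex
    simp only [List.foldl_cons]
    by_cases hrest : ∃ e' ∈ l, e'.1 = a
    · exact ih _ _ _ (fun e' he' => h e' (List.mem_cons_of_mem _ he')) hrest
    · have hea : e.1 = a := by
        rcases hex with ⟨e', he', h1⟩
        rcases List.mem_cons.1 he' with h2 | h2
        · subst h2; exact h1
        · exact absurd ⟨e', h2, h1⟩ hrest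
      have hv : generateKeys e.2 = v := h e List.mem_cons_self hea
      have hne : ∀ e' ∈ l, e'.1 ≠ a := fun e' he' hh => hrest ⟨e', he', hh⟩
      rw [get?_fold_insert_of_ne l _ a hne]
      subst hea
      rw [PySem.Dict.get?_insert_self, hv]

theorem mem_keys_pvKM (entities : List (String × (List (String × String)))) (a : String) :
    a ∈ PySem.Dict.keys (pvKM entities) ↔ a ∈ entities.map Prod.fst := by
  simp only [pvKM, PySem.Dict.keys_foldl_insert_key, PySem.Dict.keys_empty,
    PySem.Set.update_nil_left, PySem.Set.mem_ofList]

theorem nodup_keys_pvKM (entities : List (String × (List (String × String)))) :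
    (PySem.Dict.keys (pvKM entities)).Nodup := by
  simp only [pvKM, PySem.Dict.keys_foldl_insert_key, PySem.Dict.keys_empty,
    PySem.Set.update_nil_left]
  exact PySem.Set.nodup_ofList _

theorem pair_consistent {α β γ : Type} (f : β → γ) : ∀ (l : List (α × β)),
    l.Pairwise (fun x y => x.1 = y.1 → f x.2 = f y.2) →
    ∀ (a : α) (c : β), (a, c) ∈ l → ∀ e ∈ l, e.1 = a → f e.2 = f c := by
  intro l
  induction l with
  | nil => intro _ a c h; simp at h
  | cons x l ih =>
    intro hp a c hac e he hea
    rcases List.pairwise_cons.1 hp with ⟨hx, hl⟩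
    rcases List.mem_cons.1 hac with h1 | h1 <;> rcases List.mem_cons.1 he with h2 | h2
    · subst h2; rw [← h1]
    · have hx1 : x.1 = a := by rw [← h1]
      have hx2 : f x.2 = f c := by rw [← h1]
      have := hx e h2 (by rw [hx1, hea])
      rw [← this, hx2]
    · subst h2
      exact hx (a, c) h1 hea
    · exact ih hl a c h1 e h2 hea

theorem keyOf_pvKM (entities : List (String × (List (String × String))))
    (hP : entities.Pairwise (fun x y => x.1 = y.1 → generateKeys x.2 = generateKeys y.2))
    {a : String} {c : List (String × String)} (hac : (a, c) ∈ entities) :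
    pvKeyOf (pvKM entities) a = generateKeys c := by
  have h := get?_fold_insert_eq entities PySem.Dict.empty a (generateKeys c)
    (fun e he hea => pair_consistent generateKeys entities hP a c hac e he hea)
    ⟨(a, c), hac, rfl⟩
  unfold pvKeyOf pvKM
  rw [PySem.Dict.getD_eq_get?_getD]
  rw [h]
  rfl

theorem kta_inner_mem : ∀ (keys : List String) (d : PySem.Dict String (PySem.Set String))
    (a k y : String),
    (y ∈ (keys.foldl (fun kta key => kta.modify key PySem.Set.empty (fun s => PySem.Set.add s a)) d).getD k PySem.Set.empty) ↔
      y ∈ d.getD k PySem.Set.empty ∨ (y = a ∧ k ∈ keys) := by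
  intro keys
  induction keys with
  | nil => intro d a k y; simp
  | cons k0 keys ih =>
    intro d a k y
    simp only [List.foldl_cons]
    rw [ih]
    rw [PySem.Dict.getD_modify]
    by_cases hk : k = k0
    · rw [if_pos hk, hk]
      have hmem := PySem.Set.mem_add (d.getD k0 PySem.Set.empty) a y
      simp only [hmem, List.mem_cons]
      constructor
      · rintro ((h | h) | ⟨h1, h2⟩)
        · exact Or.inl h
        · exact Or.inr ⟨h, Or.inl trivial⟩
        · exact Or.inr ⟨h1, Or.inr h2⟩
      · rintro (h | ⟨h1, _⟩)
        · exact Or.inl (Or.inl h)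
        · exact Or.inl (Or.inr h1)
    · rw [if_neg hk]
      simp only [List.mem_cons]
      constructor
      · rintro (h | ⟨h1, h2⟩)
        · exact Or.inl h
        · exact Or.inr ⟨h1, Or.inr h2⟩
      · rintro (h | ⟨h1, h2 | h2⟩)
        · exact Or.inl h
        · exact absurd h2 hk
        · exact Or.inr ⟨h1, h2⟩

theorem kta_mem : ∀ (l : List (String × (List (String × String))))
    (d1 d2 : PySem.Dict String (PySem.Set String)) (k y : String),
    (y ∈ ((l.foldl pvStepA (d1, d2)).1).getD k PySem.Set.empty) ↔
      y ∈ d1.getD k PySem.Set.empty ∨ ∃ e ∈ l, e.1 = y ∧ k ∈ generateKeys e.2 := by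
  intro l
  induction l with
  | nil => intro d1 d2 k y; simp
  | cons e l ih =>
    intro d1 d2 k y
    simp only [List.foldl_cons]
    rw [show pvStepA (d1, d2) e =
      ((generateKeys e.2).foldl (fun kta key => kta.modify key PySem.Set.empty (fun s => PySem.Set.add s e.1)) d1,
       d2.insert e.1 (generateKeys e.2)) from rfl]
    rw [ih]
    rw [kta_inner_mem]
    constructor
    · rintro ((h | ⟨h1, h2⟩) | ⟨e', he', h1, h2⟩)
      · exact Or.inl h
      · exact Or.inr ⟨e, List.mem_cons_self, h1.symm, h2⟩
      · exact Or.inr ⟨e', List.mem_cons_of_mem _ he', h1, h2⟩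
    · rintro (h | ⟨e', he', h1, h2⟩)
      · exact Or.inl (Or.inl h)
      · rcases List.mem_cons.1 he' with h3 | h3
        · subst h3; exact Or.inl (Or.inr ⟨h1.symm, h2⟩)
        · exact Or.inr ⟨e', h3, h1, h2⟩

theorem kta_char (entities : List (String × (List (String × String))))
    (hP : entities.Pairwise (fun x y => x.1 = y.1 → generateKeys x.2 = generateKeys y.2)) (k y : String) :
    y ∈ (pvKTA entities).getD k PySem.Set.empty ↔
      y ∈ PySem.Dict.keys (pvKM entities) ∧ k ∈ pvKeyOf (pvKM entities) y := by
  unfold pvKTA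
  rw [kta_mem]
  constructor
  · rintro (h | ⟨e, he, h1, h2⟩)
    · rw [PySem.Dict.getD_empty] at h
      simp at h
    · subst h1
      refine ⟨(mem_keys_pvKM entities e.1).2 (List.mem_map.2 ⟨e, he, rfl⟩), ?_⟩
      rw [keyOf_pvKM entities hP (show (e.1, e.2) ∈ entities from by simpa using he)]
      exact h2
  · rintro ⟨hy, hk⟩
    rcases List.mem_map.1 ((mem_keys_pvKM entities y).1 hy) with ⟨e, he, rfl⟩
    refine Or.inr ⟨e, he, rfl, ?_⟩
    rw [keyOf_pvKM entities hP (show (e.1, e.2) ∈ entities from by simpa using he)] at hk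
    exact hk

theorem nbr_char (entities : List (String × (List (String × String))))
    (hP : entities.Pairwise (fun x y => x.1 = y.1 → generateKeys x.2 = generateKeys y.2)) (x y : String) :
    pvNbr (pvKTA entities) (pvKM entities) x y ↔
      y ∈ PySem.Dict.keys (pvKM entities) ∧ pvAdj (pvKM entities) x y := by
  unfold pvNbr pvAdj pvKeyOf
  constructor
  · rintro ⟨k, h1, h2⟩
    rcases (kta_char entities hP k y).1 h2 with ⟨hy, hk⟩
    exact ⟨hy, k, h1, hk⟩
  · rintro ⟨hy, k, h1, h2⟩
    exact ⟨k, h1, (kta_char entities hP k y).2 ⟨hy, h2⟩⟩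

-- ---- reach lemmas ----

theorem reach_nil (nbr : String → String → Prop) (visited : List String) (z : String) :
    ¬ pvReach nbr visited [] z := by
  intro h
  induction h with
  | base x hx _ => simp at hx
  | step x y _ _ _ ih => exact ih

theorem reach_not_visited {nbr : String → String → Prop} {visited stack : List String} {z : String}
    (h : pvReach nbr visited stack z) : z ∉ visited := by
  cases h with
  | base _ _ h2 => exact h2
  | step _ _ _ _ h2 => exact h2

theorem reach_pop_visited {nbr : String → String → Prop} {visited rest : List String} {x : String}
    (hx : x ∈ visited) (z : String) :
    pvReach nbr visited (rest ++ [x]) z ↔ pvReach nbr visited rest z := by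
  constructor
  · intro h
    induction h with
    | base w hw hwv =>
      rcases List.mem_append.1 hw with hw | hw
      · exact pvReach.base w hw hwv
      · simp at hw; subst hw; exact absurd hx hwv
    | step w y _ hn hyv ih => exact pvReach.step w y ih hn hyv
  · intro h
    induction h with
    | base w hw hwv => exact pvReach.base w (List.mem_append.2 (Or.inl hw)) hwv
    | step w y _ hn hyv ih => exact pvReach.step w y ih hn hyv

theorem reach_pop (nbr : String → String → Prop) {visited rest stack' visited' : List String} {x : String}
    (hx : x ∉ visited)
    (hv : ∀ y, y ∈ visited' ↔ y ∈ visited ∨ y = x)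
    (hs : ∀ y, y ∈ stack' ↔ y ∈ rest ∨ (nbr x y ∧ y ∉ visited')) :
    ∀ z, pvReach nbr visited (rest ++ [x]) z ↔ z = x ∨ pvReach nbr visited' stack' z := by
  intro z
  constructor
  · intro h
    induction h with
    | base w hw hwv =>
      by_cases hwx : w = x
      · exact Or.inl hwx
      · rcases List.mem_append.1 hw with hw | hw
        · refine Or.inr (pvReach.base w (hs w |>.2 (Or.inl hw)) ?_)
          intro hmem; rcases (hv w).1 hmem with h1 | h1
          · exact hwv h1
          · exact hwx h1
        · simp at hw; exact absurd hw hwx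
    | step w y _ hn hyv ih =>
      by_cases hyx : y = x
      · exact Or.inl hyx
      · have hyv' : y ∉ visited' := by
          intro hmem; rcases (hv y).1 hmem with h1 | h1
          · exact hyv h1
          · exact hyx h1
        rcases ih with h1 | h1
        · subst h1
          exact Or.inr (pvReach.base y ((hs y).2 (Or.inr ⟨hn, hyv'⟩)) hyv')
        · exact Or.inr (pvReach.step w y h1 hn hyv')
  · intro h
    rcases h with h | h
    · subst h
      exact pvReach.base z (List.mem_append.2 (Or.inr (by simp))) hx
    · induction h with
      | base w hw hwv =>
        have hwvis : w ∉ visited := fun hmem => hwv ((hv w).2 (Or.inl hmem))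
        rcases (hs w).1 hw with h1 | h1
        · exact pvReach.base w (List.mem_append.2 (Or.inl h1)) hwvis
        · refine pvReach.step x w (pvReach.base x (List.mem_append.2 (Or.inr (by simp))) hx) h1.1 hwvis
      | step w y _ hn hyv ih =>
        have hyvis : y ∉ visited := fun hmem => hyv ((hv y).2 (Or.inl hmem))
        exact pvReach.step w y ih hn hyvis

-- ---- dfs characterization ----

theorem filter_push_mem (v' : List String) : ∀ (l s : List String) (y : String),
    y ∈ l.foldl (fun s n => if PySem.Set.contains v' n then s else s ++ [n]) s ↔
      y ∈ s ∨ (y ∈ l ∧ y ∉ v') := by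
  intro l
  induction l with
  | nil => intro s y; simp
  | cons n l ih =>
    intro s y
    simp only [List.foldl_cons]
    rw [ih]
    by_cases hn : n ∈ v'
    · have hc : PySem.Set.contains v' n = true := (PySem.Set.contains_iff _ _).2 hn
      simp only [hc, if_true, List.mem_cons]
      constructor
      · rintro (h | h)
        · exact Or.inl h
        · exact Or.inr ⟨Or.inr h.1, h.2⟩
      · rintro (h | ⟨h1 | h1, h2⟩)
        · exact Or.inl h
        · subst h1; exact absurd hn h2
        · exact Or.inr ⟨h1, h2⟩
    · have hc : PySem.Set.contains v' n = false := by
        cases h : PySem.Set.contains v' n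
        · rfl
        · exact absurd ((PySem.Set.contains_iff _ _).1 h) hn
      simp only [hc, if_false, List.mem_cons]
      constructor
      · intro h
        rcases h with h | h
        · rcases List.mem_append.1 h with h2 | h2
          · exact Or.inl h2
          · simp at h2; subst h2; exact Or.inr ⟨Or.inl rfl, hn⟩
        · exact Or.inr ⟨Or.inr h.1, h.2⟩
      · intro h
        rcases h with h | h
        · exact Or.inl (List.mem_append.2 (Or.inl h))
        · rcases h with ⟨h1 | h1, h2⟩
          · subst h1; exact Or.inl (List.mem_append.2 (Or.inr (by simp)))
          · exact Or.inr ⟨h1, h2⟩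

theorem filter_push_len (v' : List String) : ∀ (l s : List String),
    (l.foldl (fun s n => if PySem.Set.contains v' n then s else s ++ [n]) s).length ≤ s.length + l.length := by
  intro l
  induction l with
  | nil => intro s; simp
  | cons n l ih =>
    intro s
    simp only [List.foldl_cons, List.length_cons]
    by_cases hc : PySem.Set.contains v' n = true
    · simp only [hc, if_true]; have := ih s; omega
    · have hc' : PySem.Set.contains v' n = false := by
        cases h : PySem.Set.contains v' n
        · rfl
        · exact absurd h hc
      simp only [hc', Bool.false_eq_true, if_false]
      have := ih (s ++ [n])
      simp only [List.length_append, List.length_cons, List.length_nil] at this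
      omega

theorem push_mem (kta : PySem.Dict String (PySem.Set String)) (v' : List String) :
    ∀ (keys : List String) (s : List String) (y : String),
    y ∈ keys.foldl (fun s key =>
        (PySem.Dict.getD kta key PySem.Set.empty).foldl (fun s n => if PySem.Set.contains v' n then s else s ++ [n]) s) s ↔
      y ∈ s ∨ ∃ k ∈ keys, y ∈ PySem.Dict.getD kta k PySem.Set.empty ∧ y ∉ v' := by
  intro keys
  induction keys with
  | nil => intro s y; simp
  | cons k keys ih =>
    intro s y
    simp only [List.foldl_cons]
    rw [ih, filter_push_mem]
    constructor
    · rintro ((h | ⟨h1, h2⟩) | ⟨k', hk', h1, h2⟩)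
      · exact Or.inl h
      · exact Or.inr ⟨k, List.mem_cons_self, h1, h2⟩
      · exact Or.inr ⟨k', List.mem_cons_of_mem _ hk', h1, h2⟩
    · rintro (h | ⟨k', hk', h1, h2⟩)
      · exact Or.inl (Or.inl h)
      · rcases List.mem_cons.1 hk' with h3 | h3
        · subst h3; exact Or.inl (Or.inr ⟨h1, h2⟩)
        · exact Or.inr ⟨k', h3, h1, h2⟩

theorem push_len (kta : PySem.Dict String (PySem.Set String)) (v' : List String) :
    ∀ (keys : List String) (s : List String),
    (keys.foldl (fun s key =>
        (PySem.Dict.getD kta key PySem.Set.empty).foldl (fun s n => if PySem.Set.contains v' n then s else s ++ [n]) s) s).length ≤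
      s.length + (keys.map (fun k => (PySem.Dict.getD kta k PySem.Set.empty).length)).sum := by
  intro keys
  induction keys with
  | nil => intro s; simp
  | cons k keys ih =>
    intro s
    simp only [List.foldl_cons, List.map_cons, List.sum_cons]
    have h1 := filter_push_len v' (PySem.Dict.getD kta k PySem.Set.empty) s
    have h2 := ih ((PySem.Dict.getD kta k PySem.Set.empty).foldl (fun s n => if PySem.Set.contains v' n then s else s ++ [n]) s)
    omega

theorem getLast?_split {α : Type} : ∀ {l : List α} {a : α}, l.getLast? = some a → l.dropLast ++ [a] = l := by
  intro l
  induction l with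
  | nil => intro a h; simp at h
  | cons x xs ih =>
    intro a h
    cases xs with
    | nil =>
      simp at h
      subst h
      rfl
    | cons y ys =>
      have h' : (y :: ys).getLast? = some a := by rwa [List.getLast?_cons_cons] at h
      have hih := ih h'
      calc (x :: y :: ys).dropLast ++ [a] = x :: ((y :: ys).dropLast ++ [a]) := by simp
        _ = x :: (y :: ys) := by rw [hih]

theorem dfs_spec (kta atk : PySem.Dict String (PySem.Set String))
    (hka : ∀ k y, y ∈ PySem.Dict.getD kta k PySem.Set.empty → y ∈ PySem.Dict.keys atk)
    (hnd : (PySem.Dict.keys atk).Nodup) :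
    ∀ (fuel : Nat) (stack visited group : List String),
    stack ⊆ PySem.Dict.keys atk → visited.Nodup → group.Nodup →
    stack.length + (((PySem.Dict.keys atk).filter (fun u => !(PySem.Set.contains visited u))).map
      (fun u => 1 + pvDeg kta atk u)).sum ≤ fuel →
    (let r := dfsA kta atk fuel stack visited group
     r.1.Nodup ∧ r.2.Nodup ∧
     (∀ z, z ∈ r.1 ↔ z ∈ visited ∨ pvReach (pvNbr kta atk) visited stack z) ∧
     (∀ z, z ∈ r.2 ↔ z ∈ group ∨ pvReach (pvNbr kta atk) visited stack z)) := by
  intro fuel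
  induction fuel with
  | zero =>
    intro stack visited group hsub hv hg hfuel
    have hstack : stack = [] := by
      cases stack with
      | nil => rfl
      | cons x xs => exfalso; simp only [List.length_cons] at hfuel; omega
    subst hstack
    refine ⟨hv, hg, ?_, ?_⟩
    · intro z
      constructor
      · intro hz; exact Or.inl hz
      · rintro (hz | hz)
        · exact hz
        · exact (reach_nil _ _ _ hz).elim
    · intro z
      constructor
      · intro hz; exact Or.inl hz
      · rintro (hz | hz)
        · exact hz
        · exact (reach_nil _ _ _ hz).elim
  | succ fuel ih =>
    intro stack visited group hsub hv hg hfuel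
    cases hgl : stack.getLast? with
    | none =>
      have hstack : stack = [] := by
        cases stack with
        | nil => rfl
        | cons x xs => simp at hgl
      subst hstack
      have hred : dfsA kta atk (fuel + 1) [] visited group = (visited, group) := by
        simp only [dfsA, List.getLast?_nil]
      rw [hred]
      refine ⟨hv, hg, ?_, ?_⟩
      · intro z
        constructor
        · intro hz; exact Or.inl hz
        · rintro (hz | hz)
          · exact hz
          · exact (reach_nil _ _ _ hz).elim
      · intro z
        constructor
        · intro hz; exact Or.inl hz
        · rintro (hz | hz)
          · exact hz
          · exact (reach_nil _ _ _ hz).elim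
    | some cur =>
      have hsplit : stack.dropLast ++ [cur] = stack := getLast?_split hgl
      have hcmem : cur ∈ stack := by
        rw [← hsplit]
        exact List.mem_append.2 (Or.inr (by simp))
      have hccur : cur ∈ PySem.Dict.keys atk := hsub hcmem
      have hlenstack : stack.dropLast.length + 1 = stack.length := by
        conv_rhs => rw [← hsplit]
        simp
      have hsubrest : stack.dropLast ⊆ PySem.Dict.keys atk :=
        List.Subset.trans (List.dropLast_sublist _).subset hsub
      by_cases hcv : cur ∈ visited
      · have hcont : PySem.Set.contains visited cur = true := (PySem.Set.contains_iff _ _).2 hcv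
        have hred : dfsA kta atk (fuel + 1) stack visited group =
            dfsA kta atk fuel stack.dropLast visited group := by
          simp only [dfsA, hgl, hcont, if_true]
        rw [hred]
        obtain ⟨d1, d2, d3, d4⟩ := ih stack.dropLast visited group hsubrest hv hg (by omega)
        refine ⟨d1, d2, ?_, ?_⟩
        · intro z
          rw [d3 z]
          conv_rhs => rw [← hsplit]
          rw [reach_pop_visited hcv z]
        · intro z
          rw [d4 z]
          conv_rhs => rw [← hsplit]
          rw [reach_pop_visited hcv z]
      · have hcont : PySem.Set.contains visited cur = false := by
          cases h : PySem.Set.contains visited cur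
          · rfl
          · exact absurd ((PySem.Set.contains_iff _ _).1 h) hcv
        have hred : dfsA kta atk (fuel + 1) stack visited group =
            dfsA kta atk fuel
              ((PySem.Dict.getD atk cur PySem.Set.empty).foldl (fun s key =>
                (PySem.Dict.getD kta key PySem.Set.empty).foldl (fun s neighbor =>
                  if PySem.Set.contains (PySem.Set.add visited cur) neighbor then s else s ++ [neighbor]) s) stack.dropLast)
              (PySem.Set.add visited cur) (PySem.Set.add group cur) := by
          simp only [dfsA, hgl, hcont, Bool.false_eq_true, if_false]
        rw [hred]
        set v' := PySem.Set.add visited cur with hv'def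
        set stack' := (PySem.Dict.getD atk cur PySem.Set.empty).foldl (fun s key =>
          (PySem.Dict.getD kta key PySem.Set.empty).foldl (fun s neighbor =>
            if PySem.Set.contains v' neighbor then s else s ++ [neighbor]) s) stack.dropLast with hstk
        have hvmem : ∀ y, y ∈ v' ↔ y ∈ visited ∨ y = cur := fun y => PySem.Set.mem_add _ _ _
        have hsm : ∀ y, y ∈ stack' ↔ y ∈ stack.dropLast ∨ (pvNbr kta atk cur y ∧ y ∉ v') := by
          intro y
          rw [hstk, push_mem]
          constructor
          · rintro (h | ⟨k, hk, h1, h2⟩)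
            · exact Or.inl h
            · exact Or.inr ⟨⟨k, hk, h1⟩, h2⟩
          · rintro (h | ⟨⟨k, hk, h1⟩, h2⟩)
            · exact Or.inl h
            · exact Or.inr ⟨k, hk, h1, h2⟩
        have hsub' : stack' ⊆ PySem.Dict.keys atk := by
          intro y hy
          rcases (hsm y).1 hy with h | ⟨⟨k, hk, h1⟩, _⟩
          · exact hsubrest h
          · exact hka k y h1
        have hlen' : stack'.length ≤ stack.dropLast.length + pvDeg kta atk cur := by
          rw [hstk]
          exact push_len kta v' _ _
        set w := fun u => 1 + pvDeg kta atk u with hw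
        set filt := (PySem.Dict.keys atk).filter (fun u => !(PySem.Set.contains visited u)) with hfilt
        set filt' := (PySem.Dict.keys atk).filter (fun u => !(PySem.Set.contains v' u)) with hfilt'
        have hcfilt : cur ∈ filt := by
          rw [hfilt, List.mem_filter]
          exact ⟨hccur, by rw [hcont]; rfl⟩
        have hff : filt' = filt.filter (fun u => u != cur) := by
          rw [hfilt, hfilt', List.filter_filter]
          apply List.filter_congr
          intro u _
          by_cases h1 : u = cur
          · subst h1
            have hmemu : u ∈ v' := (hvmem u).2 (Or.inr rfl)
            have hcv' : PySem.Set.contains v' u = true := (PySem.Set.contains_iff _ _).2 hmemu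
            simp [hcv', hmemu]
          · have h2 : PySem.Set.contains v' u = PySem.Set.contains visited u := by
              cases hvv : PySem.Set.contains visited u
              · cases hvc : PySem.Set.contains v' u
                · rfl
                · exfalso
                  rcases (hvmem u).1 ((PySem.Set.contains_iff _ _).1 hvc) with h3 | h3
                  · rw [(PySem.Set.contains_iff _ _).2 h3] at hvv; cases hvv
                  · exact h1 h3
              · rw [(PySem.Set.contains_iff _ _).2 ((hvmem u).2 (Or.inl ((PySem.Set.contains_iff _ _).1 hvv)))]
            rw [h2]
            simp [h1]
        have hnfilt : filt.Nodup := hnd.filter _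
        have herase : filt.erase cur = filt.filter (fun u => u != cur) := hnfilt.erase_eq_filter cur
        have hperm : filt.Perm (cur :: filt.erase cur) := List.perm_cons_erase hcfilt
        have hsum : (filt.map w).sum = w cur + (filt'.map w).sum := by
          rw [(hperm.map w).sum_eq]
          rw [hff, ← herase]
          simp
        have hwc : w cur = 1 + pvDeg kta atk cur := rfl
        have hbound : stack'.length +
            (((PySem.Dict.keys atk).filter (fun u => !(PySem.Set.contains v' u))).map w).sum ≤ fuel := by
          have hee : (((PySem.Dict.keys atk).filter (fun u => !(PySem.Set.contains v' u))).map w).sum =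
              (filt'.map w).sum := by rw [hfilt']
          omega
        obtain ⟨d1, d2, d3, d4⟩ := ih stack' v' (PySem.Set.add group cur) hsub'
          (PySem.Set.nodup_add _ _ hv) (PySem.Set.nodup_add _ _ hg) hbound
        have hpop := reach_pop (pvNbr kta atk) hcv hvmem hsm
        refine ⟨d1, d2, ?_, ?_⟩
        · intro z
          rw [d3 z]
          conv_rhs => rw [← hsplit]
          rw [hpop z]
          constructor
          · rintro (h | h)
            · rcases (hvmem z).1 h with h1 | h1
              · exact Or.inl h1
              · exact Or.inr (Or.inl h1)
            · exact Or.inr (Or.inr h)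
          · rintro (h | h | h)
            · exact Or.inl ((hvmem z).2 (Or.inl h))
            · exact Or.inl ((hvmem z).2 (Or.inr h))
            · exact Or.inr h
        · intro z
          rw [d4 z]
          conv_rhs => rw [← hsplit]
          rw [hpop z]
          constructor
          · rintro (h | h)
            · rcases (PySem.Set.mem_add group cur z).1 h with h1 | h1
              · exact Or.inl h1
              · exact Or.inr (Or.inl h1)
            · exact Or.inr (Or.inr h)
          · rintro (h | h | h)
            · exact Or.inl ((PySem.Set.mem_add group cur z).2 (Or.inl h))
            · exact Or.inl ((PySem.Set.mem_add group cur z).2 (Or.inr h))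
            · exact Or.inr h

-- ---- reach = component ----

theorem reach_eq_comp (entities : List (String × (List (String × String))))
    (hP : entities.Pairwise (fun x y => x.1 = y.1 → generateKeys x.2 = generateKeys y.2))
    (visited : List String) (a : String)
    (hvk : visited ⊆ PySem.Dict.keys (pvKM entities))
    (hcl : ∀ x ∈ visited, ∀ y ∈ PySem.Dict.keys (pvKM entities), pvAdj (pvKM entities) x y → y ∈ visited)
    (ha : a ∈ PySem.Dict.keys (pvKM entities)) (hav : a ∉ visited) :
    ∀ z, pvReach (pvNbr (pvKTA entities) (pvKM entities)) visited [a] z ↔ z ∈ pvComp (pvKM entities) a := by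
  intro z
  constructor
  · intro h
    induction h with
    | base w hw hwv =>
      simp at hw
      subst hw
      exact comp_self _ _ ha
    | step x y _ hn hyv ih =>
      rcases (nbr_char entities hP x y).1 hn with ⟨hyk, hadj⟩
      exact comp_closed _ _ ha x y ih hyk hadj
  · intro hz
    refine comp_min (pvKM entities)
      (fun w => pvReach (pvNbr (pvKTA entities) (pvKM entities)) visited [a] w) a ?_ ?_ ha z hz
    · intro x y hx hxk hyk hadj
      have hyv : y ∉ visited := by
        intro hymem
        exact reach_not_visited hx (hcl y hymem x hxk (adj_symm _ hadj))
      exact pvReach.step x y hx ((nbr_char entities hP x y).2 ⟨hyk, hadj⟩) hyv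
    · exact pvReach.base a (by simp) hav

-- ---- outer loops ----

theorem contains_eq_of_iff {s t : PySem.Set String} {x : String} (h : x ∈ s ↔ x ∈ t) :
    PySem.Set.contains s x = PySem.Set.contains t x := by
  by_cases hx : x ∈ t
  · rw [(PySem.Set.contains_iff _ _).2 hx, (PySem.Set.contains_iff _ _).2 (h.2 hx)]
  · have h1 : PySem.Set.contains t x = false := by
      cases hc : PySem.Set.contains t x
      · rfl
      · exact absurd ((PySem.Set.contains_iff _ _).1 hc) hx
    have h2 : PySem.Set.contains s x = false := by
      cases hc : PySem.Set.contains s x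
      · rfl
      · exact absurd (h.1 ((PySem.Set.contains_iff _ _).1 hc)) hx
    rw [h1, h2]

theorem outer_fold (entities : List (String × (List (String × String))))
    (hP : entities.Pairwise (fun x y => x.1 = y.1 → generateKeys x.2 = generateKeys y.2))
    (fuel : Nat)
    (hfuel : ∀ visited : List String,
      1 + (((PySem.Dict.keys (pvKM entities)).filter (fun u => !(PySem.Set.contains visited u))).map
        (fun u => 1 + pvDeg (pvKTA entities) (pvKM entities) u)).sum ≤ fuel) :
    ∀ (l : List String), l ⊆ PySem.Dict.keys (pvKM entities) →
    ∀ (visited : List String) (groups : List (List String)),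
    visited.Nodup → visited ⊆ PySem.Dict.keys (pvKM entities) →
    (∀ x ∈ visited, ∀ y ∈ PySem.Dict.keys (pvKM entities), pvAdj (pvKM entities) x y → y ∈ visited) →
    (∀ a ∈ PySem.Dict.keys (pvKM entities),
      (((PySem.Dict.keys (pvKM entities)).filter (fun z => PySem.Set.contains (pvComp (pvKM entities) a) z)) ∈ groups ↔ a ∈ visited)) →
    (l.foldl (fun (acc : PySem.Set String × List (List String)) address =>
        if PySem.Set.contains acc.1 address then acc
        else
          let r := dfsA (pvKTA entities) (pvKM entities) fuel [address] acc.1 PySem.Set.empty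
          (r.1, acc.2 ++ [(PySem.Dict.keys (pvKM entities)).filter (fun z => PySem.Set.contains r.2 z)]))
      (visited, groups)).2 =
    l.foldl (fun (groups : List (List String)) a =>
        let r := saturateB (pvKM entities) (PySem.Dict.keys (pvKM entities)) ((PySem.Dict.keys (pvKM entities)).length + 1)
          (PySem.Set.add PySem.Set.empty a)
          (PySem.Set.ofList (PySem.Dict.getD (pvKM entities) a PySem.Set.empty))
        let c := (PySem.Dict.keys (pvKM entities)).filter (fun z => PySem.Set.contains r.1 z)
        if groups.contains c then groups else groups ++ [c]) groups := by
  intro l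
  induction l with
  | nil =>
    intro _ visited groups _ _ _ _
    rfl
  | cons a l ih =>
    intro hl visited groups hvnd hvk hcl hchk
    have ha : a ∈ PySem.Dict.keys (pvKM entities) := hl List.mem_cons_self
    have hl' : l ⊆ PySem.Dict.keys (pvKM entities) := fun _ hx => hl (List.mem_cons_of_mem _ hx)
    simp only [List.foldl_cons]
    have hpc : (List.filter (fun z => PySem.Set.contains (saturateB (pvKM entities) (PySem.Dict.keys (pvKM entities))
        ((PySem.Dict.keys (pvKM entities)).length + 1) (PySem.Set.add PySem.Set.empty a)
        (PySem.Set.ofList (PySem.Dict.getD (pvKM entities) a PySem.Set.empty))).1 z) (PySem.Dict.keys (pvKM entities))) =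
        (List.filter (fun z => PySem.Set.contains (pvComp (pvKM entities) a) z) (PySem.Dict.keys (pvKM entities))) := rfl
    by_cases hav : a ∈ visited
    · have hca : PySem.Set.contains visited a = true := (PySem.Set.contains_iff _ _).2 hav
      have hbc : groups.contains ((PySem.Dict.keys (pvKM entities)).filter
          (fun z => PySem.Set.contains (pvComp (pvKM entities) a) z)) = true :=
        List.contains_iff_mem.2 ((hchk a ha).2 hav)
      rw [if_pos hca, hpc, if_pos hbc]
      exact ih hl' visited groups hvnd hvk hcl hchk
    · have hca : PySem.Set.contains visited a = false := by
        cases hc : PySem.Set.contains visited a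
        · rfl
        · exact absurd ((PySem.Set.contains_iff _ _).1 hc) hav
      have hnot : ¬ (PySem.Set.contains visited a = true) := by
        intro hc
        rw [hca] at hc
        cases hc
      obtain ⟨e1, e2, e3, e4⟩ := dfs_spec (pvKTA entities) (pvKM entities)
        (fun k y hy => ((kta_char entities hP k y).1 hy).1) (nodup_keys_pvKM entities)
        fuel [a] visited PySem.Set.empty
        (by intro y hy; simp at hy; subst hy; exact ha) hvnd List.nodup_nil
        (by have := hfuel visited; simpa using this)
      have hreq := reach_eq_comp entities hP visited a hvk hcl ha hav
      have hr2 : ∀ z, z ∈ (dfsA (pvKTA entities) (pvKM entities) fuel [a] visited PySem.Set.empty).2 ↔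
          z ∈ pvComp (pvKM entities) a := by
        intro z
        rw [e4 z]
        constructor
        · rintro (h | h)
          · simp at h
          · exact (hreq z).1 h
        · intro h
          exact Or.inr ((hreq z).2 h)
      have hr1 : ∀ z, z ∈ (dfsA (pvKTA entities) (pvKM entities) fuel [a] visited PySem.Set.empty).1 ↔
          z ∈ visited ∨ z ∈ pvComp (pvKM entities) a := by
        intro z
        rw [e3 z]
        constructor
        · rintro (h | h)
          · exact Or.inl h
          · exact Or.inr ((hreq z).1 h)
        · rintro (h | h)
          · exact Or.inl h
          · exact Or.inr ((hreq z).2 h)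
      have hcanon : (List.filter
            (fun z => PySem.Set.contains (dfsA (pvKTA entities) (pvKM entities) fuel [a] visited PySem.Set.empty).2 z)
            (PySem.Dict.keys (pvKM entities))) =
          (List.filter (fun z => PySem.Set.contains (pvComp (pvKM entities) a) z) (PySem.Dict.keys (pvKM entities))) := by
        apply List.filter_congr
        intro u _
        exact contains_eq_of_iff (hr2 u)
      have hbc : groups.contains ((PySem.Dict.keys (pvKM entities)).filter
          (fun z => PySem.Set.contains (pvComp (pvKM entities) a) z)) = false := by
        cases hc : groups.contains ((PySem.Dict.keys (pvKM entities)).filter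
            (fun z => PySem.Set.contains (pvComp (pvKM entities) a) z))
        · rfl
        · exact ((hav ((hchk a ha).1 (List.contains_iff_mem.1 hc))).elim)
      have hnotb : ¬ (groups.contains ((PySem.Dict.keys (pvKM entities)).filter
          (fun z => PySem.Set.contains (pvComp (pvKM entities) a) z)) = true) := by
        intro hc
        rw [hbc] at hc
        cases hc
      rw [if_neg hnot, hpc, if_neg hnotb, hcanon]
      apply ih hl' (dfsA (pvKTA entities) (pvKM entities) fuel [a] visited PySem.Set.empty).1
        (groups ++ [(PySem.Dict.keys (pvKM entities)).filter (fun z => PySem.Set.contains (pvComp (pvKM entities) a) z)])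
        e1
      · intro x hx
        rcases (hr1 x).1 hx with h | h
        · exact hvk h
        · exact comp_subset (pvKM entities) a ha h
      · intro x hxv y hyk hadj
        rcases (hr1 x).1 hxv with h | h
        · exact (hr1 y).2 (Or.inl (hcl x h y hyk hadj))
        · exact (hr1 y).2 (Or.inr (comp_closed (pvKM entities) a ha x y h hyk hadj))
      · intro b hb
        constructor
        · intro hmem
          rcases List.mem_append.1 hmem with h | h
          · exact (hr1 b).2 (Or.inl ((hchk b hb).1 h))
          · simp only [List.mem_singleton] at h
            have hbself : b ∈ (PySem.Dict.keys (pvKM entities)).filter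
                (fun z => PySem.Set.contains (pvComp (pvKM entities) b) z) :=
              List.mem_filter.2 ⟨hb, (PySem.Set.contains_iff _ _).2 (comp_self (pvKM entities) b hb)⟩
            rw [h] at hbself
            exact (hr1 b).2 (Or.inr ((PySem.Set.contains_iff _ _).1 (List.mem_filter.1 hbself).2))
        · intro hmem
          rcases (hr1 b).1 hmem with h | h
          · exact List.mem_append.2 (Or.inl ((hchk b hb).2 h))
          · refine List.mem_append.2 (Or.inr ?_)
            simp only [List.mem_singleton]
            apply List.filter_congr
            intro u _
            exact contains_eq_of_iff ((comp_eq_of_mem (pvKM entities) ha hb h u).symm)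

-- ===== VERDICT (by name: the statement is the Claim_ definition above) =====
theorem group_addresses_spec : Claim_equal_group_addresses := by
  intro entities _ hpre
  unfold Spec_group_addresses
  show group_addresses entities = group_addresses_alt entities
  simp only [group_addresses, group_addresses_alt]
  have hfst : (entities.foldl
      (fun (st : PySem.Dict String (PySem.Set String) × PySem.Dict String (PySem.Set String)) e =>
        let keys := generateKeys e.2
        let atk := st.2.insert e.1 keys
        let kta := keys.foldl (fun kta key =>
          kta.modify key PySem.Set.empty (fun s => PySem.Set.add s e.1)) st.1
        (kta, atk))
      (PySem.Dict.empty, PySem.Dict.empty)).1 = pvKTA entities := rfl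
  have hsnd : (entities.foldl
      (fun (st : PySem.Dict String (PySem.Set String) × PySem.Dict String (PySem.Set String)) e =>
        let keys := generateKeys e.2
        let atk := st.2.insert e.1 keys
        let kta := keys.foldl (fun kta key =>
          kta.modify key PySem.Set.empty (fun s => PySem.Set.add s e.1)) st.1
        (kta, atk))
      (PySem.Dict.empty, PySem.Dict.empty)).2 = pvKM entities :=
    fold_pair_snd entities PySem.Dict.empty PySem.Dict.empty
  have hkmB : entities.foldl
      (fun (km : PySem.Dict String (PySem.Set String)) e => km.insert e.1 (generateKeys e.2))
      PySem.Dict.empty = pvKM entities := rfl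
  rw [hfst, hsnd, hkmB]
  apply outer_fold entities hpre _ ?_ (PySem.Dict.keys (pvKM entities)) (fun _ hx => hx)
    PySem.Set.empty [] List.nodup_nil (List.nil_subset _)
    (by intro x hx; simp at hx)
    (by intro a _; simp)
  intro visited
  have hsl : ((PySem.Dict.keys (pvKM entities)).filter
      (fun u => !(PySem.Set.contains visited u))).Sublist (PySem.Dict.keys (pvKM entities)) :=
    List.filter_sublist
  have hle := (hsl.map (fun u => 1 + pvDeg (pvKTA entities) (pvKM entities) u)).sum_le_sum
    (by intro a _; exact Nat.zero_le _)
  show 1 + (((PySem.Dict.keys (pvKM entities)).filter (fun u => !(PySem.Set.contains visited u))).map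
      (fun u => 1 + pvDeg (pvKTA entities) (pvKM entities) u)).sum ≤
    1 + ((PySem.Dict.keys (pvKM entities)).map
      (fun u => 1 + pvDeg (pvKTA entities) (pvKM entities) u)).sum
  omega
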